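-- pv_equiv track=rewrite | github.com/PROFESSOR-ADNAN/A2SV_Solved_Questions | codeforces/476B-Dreamoon-and-WiFi/476B-Dreamoon-and-WiFi.py | helper
-- ===== SOURCE A (Python) =====
-- def helper(s):
--     finalS = 0
--     for op in s:
--         if op == "+":
--             finalS += 1
--         else:
--             finalS -= 1
--
--     return finalS
-- ===== SOURCE B (Python) =====
-- def helper(s):
--     # Divide and conquer: split the string in half, solve each half recursively,
--     # and add the two results. Base cases: empty -> 0, single char -> +1/-1.
--     if len(s) == 0:
--         return 0
--     if len(s) == 1:
--         return 1 if s == "+" else -1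
--     m = len(s) // 2
--     return helper(s[:m]) + helper(s[m:])
-- ===== Notes on version B (the rewrite author's own statement) =====
-- stated objective: alternative
-- what changed: Replaced the left-to-right accumulator loop with a divide-and-conquer recursion that splits the string in half and sums the two recursive results (correct because the net sum is additive over concatenation).
import Mathlib
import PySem

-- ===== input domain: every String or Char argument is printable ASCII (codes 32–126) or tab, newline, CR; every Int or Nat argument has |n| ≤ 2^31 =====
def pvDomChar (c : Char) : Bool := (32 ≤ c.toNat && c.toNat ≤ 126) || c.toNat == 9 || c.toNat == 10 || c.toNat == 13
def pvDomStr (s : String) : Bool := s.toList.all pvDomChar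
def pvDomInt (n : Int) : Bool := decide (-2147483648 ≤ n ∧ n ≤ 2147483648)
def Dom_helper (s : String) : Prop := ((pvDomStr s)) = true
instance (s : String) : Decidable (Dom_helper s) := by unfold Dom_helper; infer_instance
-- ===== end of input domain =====

-- B replaces A's left-to-right +1/-1 accumulator loop with a divide-and-conquer
-- recursion on string halves (alternative decomposition; the net sum is additive
-- over concatenation).

-- ===== PORT A =====
-- for op in s: finalS += 1 if op == '+' else finalS -= 1
def helper (s : String) : Int :=
  s.toList.foldl (fun finalS op => if op == '+' then finalS + 1 else finalS - 1) 0

-- ===== PORT B =====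
-- recursion of Source B on the character list: s[:m] = take m, s[m:] = drop m
def helperAltGo (cs : List Char) : Int :=
  match cs with
  | [] => 0
  | [c] => if c == '+' then 1 else -1
  | c1 :: c2 :: rest =>
      let m := (c1 :: c2 :: rest).length / 2
      helperAltGo ((c1 :: c2 :: rest).take m) + helperAltGo ((c1 :: c2 :: rest).drop m)
  termination_by cs.length
  decreasing_by
  · simp only [List.length_take, List.length_cons]
    omega
  · simp only [List.length_drop, List.length_cons]
    omega

def helper_alt (s : String) : Int := helperAltGo s.toList

-- ===== PRECONDITION & SPEC =====
def Spec_helper (s : String) (out : Int) : Prop := out = helper_alt s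
instance (s : String) (out : Int) : Decidable (Spec_helper s out) := by unfold Spec_helper; infer_instance

-- ===== CLAIM (what is proved, stated in full; the proofs are below) =====
def Claim_equal_helper : Prop := ∀ (s : String), Dom_helper s → Spec_helper s (helper s)

-- ===== LEMMAS AND PROOFS =====
-- A's fold computes acc + (2·#'+' − length)
theorem helper_foldl_eq (cs : List Char) (acc : Int) :
    cs.foldl (fun finalS op => if op == '+' then finalS + 1 else finalS - 1) acc
      = acc + 2 * (cs.count '+' : Int) - (cs.length : Int) := by
  induction cs generalizing acc with
  | nil => simp
  | cons c cs ih =>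
    simp only [List.foldl_cons, ih, List.count_cons, List.length_cons]
    by_cases h : c = '+' <;> simp [h] <;> ring

-- B's divide-and-conquer computes the same closed form (induction on the recursion)
theorem helperAltGo_eq (cs : List Char) :
    helperAltGo cs = 2 * (cs.count '+' : Int) - (cs.length : Int) :=
  match cs with
  | [] => by simp [helperAltGo]
  | [c] => by by_cases h : c = '+' <;> simp [helperAltGo, h]
  | c1 :: c2 :: rest => by
    have ih1 := helperAltGo_eq ((c1 :: c2 :: rest).take ((c1 :: c2 :: rest).length / 2))
    have ih2 := helperAltGo_eq ((c1 :: c2 :: rest).drop ((c1 :: c2 :: rest).length / 2))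
    rw [helperAltGo, ih1, ih2]
    have hcount : ((c1 :: c2 :: rest).take ((c1 :: c2 :: rest).length / 2)).count '+'
        + ((c1 :: c2 :: rest).drop ((c1 :: c2 :: rest).length / 2)).count '+'
        = (c1 :: c2 :: rest).count '+' := by
      conv_rhs => rw [← List.take_append_drop ((c1 :: c2 :: rest).length / 2) (c1 :: c2 :: rest)]
      rw [List.count_append]
    have hlen2 : ((c1 :: c2 :: rest).take ((c1 :: c2 :: rest).length / 2)).length
        + ((c1 :: c2 :: rest).drop ((c1 :: c2 :: rest).length / 2)).length
        = (c1 :: c2 :: rest).length := by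
      conv_rhs => rw [← List.take_append_drop ((c1 :: c2 :: rest).length / 2) (c1 :: c2 :: rest)]
      rw [List.length_append]
    omega
  termination_by cs.length
  decreasing_by
  · simp only [List.length_take, List.length_cons]
    omega
  · simp only [List.length_drop, List.length_cons]
    omega

-- ===== VERDICT (by name: the statement is the Claim_ definition above) =====
theorem helper_spec : Claim_equal_helper := by
  intro s _
  unfold Spec_helper helper helper_alt
  rw [helper_foldl_eq, helperAltGo_eq]
  ring
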